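-- pv_equiv track=rewrite | github.com/Laxminayanan/Choosing-Authours-By-Students | studentInformation.py | checkIfOnlyLowerAlphabetsArePresentInTheString
-- ===== SOURCE A (Python) =====
-- def checkIfOnlyLowerAlphabetsArePresentInTheString(string):
--     for i in string:
--         asciiOfi = ord(i)
--         if ((asciiOfi >= 97 and asciiOfi <= 122)):
--             continue
--         else:
--             return False
--     return True
-- ===== SOURCE B (Python) =====
-- def checkIfOnlyLowerAlphabetsArePresentInTheString(string):
--     return set(string) <= set('abcdefghijklmnopqrstuvwxyz')
-- ===== Notes on version B (the rewrite author's own statement) =====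
-- stated objective: idiomatic
-- what changed: Replaced the per-character early-exit ord-range loop with building the set of distinct characters and one aggregate subset test against the lowercase alphabet.
import Mathlib
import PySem

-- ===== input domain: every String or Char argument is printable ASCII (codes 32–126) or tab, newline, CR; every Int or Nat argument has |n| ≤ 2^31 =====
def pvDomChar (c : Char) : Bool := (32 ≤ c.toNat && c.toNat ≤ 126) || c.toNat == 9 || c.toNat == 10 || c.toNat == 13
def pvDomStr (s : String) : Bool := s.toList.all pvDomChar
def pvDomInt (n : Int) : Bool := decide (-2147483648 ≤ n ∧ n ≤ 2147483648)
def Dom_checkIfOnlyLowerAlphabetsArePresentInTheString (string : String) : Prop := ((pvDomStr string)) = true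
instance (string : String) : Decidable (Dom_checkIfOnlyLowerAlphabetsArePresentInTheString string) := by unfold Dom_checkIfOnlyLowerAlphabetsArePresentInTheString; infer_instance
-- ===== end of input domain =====

-- B replaces A's per-character early-exit ord-range loop by one aggregate subset test
-- (set of the string's distinct characters ⊆ lowercase alphabet); same cost, more idiomatic.

-- ===== PORT A =====
-- for i in string: asciiOfi = ord(i); continue if 97 <= asciiOfi <= 122 else return False; return True
def checkLoopA : List Char → Bool
  | [] => true
  | i :: rest =>
    let asciiOfi : Int := (i.toNat : Int)
    if 97 ≤ asciiOfi ∧ asciiOfi ≤ 122 then checkLoopA rest else false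

def checkIfOnlyLowerAlphabetsArePresentInTheString (string : String) : Bool :=
  checkLoopA string.toList

-- ===== PORT B =====
-- return set(string) <= set('abcdefghijklmnopqrstuvwxyz')
def checkIfOnlyLowerAlphabetsArePresentInTheString_alt (string : String) : Bool :=
  PySem.Set.issubset (PySem.Set.ofList string.toList)
    (PySem.Set.ofList ("abcdefghijklmnopqrstuvwxyz" : String).toList)

-- ===== PRECONDITION & SPEC =====
def Spec_checkIfOnlyLowerAlphabetsArePresentInTheString (string : String) (out : Bool) : Prop := out = checkIfOnlyLowerAlphabetsArePresentInTheString_alt string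
instance (string : String) (out : Bool) : Decidable (Spec_checkIfOnlyLowerAlphabetsArePresentInTheString string out) := by unfold Spec_checkIfOnlyLowerAlphabetsArePresentInTheString; infer_instance

-- ===== CLAIM (what is proved, stated in full; the proofs are below) =====
def Claim_equal_checkIfOnlyLowerAlphabetsArePresentInTheString : Prop := ∀ (string : String), Dom_checkIfOnlyLowerAlphabetsArePresentInTheString string → Spec_checkIfOnlyLowerAlphabetsArePresentInTheString string (checkIfOnlyLowerAlphabetsArePresentInTheString string)

-- ===== LEMMAS AND PROOFS =====
def alphaChars : List Char := ['a','b','c','d','e','f','g','h','i','j','k','l','m','n','o','p','q','r','s','t','u','v','w','x','y','z']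

lemma alpha_toList : ("abcdefghijklmnopqrstuvwxyz" : String).toList = alphaChars := by decide

lemma charToNat_injective : Function.Injective Char.toNat := by
  intro c d h
  exact Char.ext (UInt32.toNat_inj.mp h)

lemma mem_alpha (c : Char) : c ∈ alphaChars ↔ (97 ≤ c.toNat ∧ c.toNat ≤ 122) := by
  have h := List.mem_map_of_injective (f := Char.toNat) (l := alphaChars) (a := c) charToNat_injective
  have hm : alphaChars.map Char.toNat = [97,98,99,100,101,102,103,104,105,106,107,108,109,110,111,112,113,114,115,116,117,118,119,120,121,122] := by decide
  rw [hm] at h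
  rw [← h]
  simp only [List.mem_cons, List.not_mem_nil, or_false]
  omega

lemma checkLoopA_iff (l : List Char) :
    checkLoopA l = true ↔ ∀ c ∈ l, 97 ≤ c.toNat ∧ c.toNat ≤ 122 := by
  induction l with
  | nil => simp [checkLoopA]
  | cons i rest ih =>
    simp only [checkLoopA, List.mem_cons]
    by_cases h : 97 ≤ (i.toNat : Int) ∧ (i.toNat : Int) ≤ 122
    · rw [if_pos h, ih]
      constructor
      · intro hr c hc
        rcases hc with rfl | hc
        · omega
        · exact hr c hc
      · intro hall c hc
        exact hall c (Or.inr hc)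
    · rw [if_neg h]
      constructor
      · intro hf; exact absurd hf (by simp)
      · intro hall
        exact absurd (hall i (Or.inl rfl)) (by omega)

-- ===== VERDICT (by name: the statement is the Claim_ definition above) =====
theorem checkIfOnlyLowerAlphabetsArePresentInTheString_spec : Claim_equal_checkIfOnlyLowerAlphabetsArePresentInTheString := by
  intro string _
  unfold Spec_checkIfOnlyLowerAlphabetsArePresentInTheString
  unfold checkIfOnlyLowerAlphabetsArePresentInTheString checkIfOnlyLowerAlphabetsArePresentInTheString_alt
  rw [Bool.eq_iff_iff, checkLoopA_iff, PySem.Set.issubset_iff]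
  constructor
  · intro hall x hx
    rw [PySem.Set.mem_ofList] at hx
    rw [PySem.Set.mem_ofList, alpha_toList, mem_alpha]
    exact hall x hx
  · intro hsub c hc
    have := hsub c (by rw [PySem.Set.mem_ofList]; exact hc)
    rw [PySem.Set.mem_ofList, alpha_toList, mem_alpha] at this
    exact this
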